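-- pv_equiv track=rewrite | github.com/gabriel-dahan/NSI | python/tuples/exos.py | gagnant
-- ===== SOURCE A (Python) =====
-- from typing import Tuple
--
-- def temps_secondes(time: Tuple[int]) -> int:
--     """ Returns how many seconds are in (hh, mm, ss). """
--     assert time[0] < 24 and time[1] < 60 and time[2] < 60, 'Format must be (hh, mm, ss) with hh < 24, mm < 60, ss < 60.'
--     return time[0] * 3600 + time[1] * 60 + time[2]
--
-- def temps_en_s(data: Tuple[Tuple[str, int]]) -> Tuple[Tuple[str, int]]:
--     new_data = []
--     for elem in data:
--         new_data.append((elem[0], temps_secondes(elem[1])))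
--     return tuple(new_data)
--
-- def gagnant(data: Tuple[Tuple[str, int]]) -> str:
--     data = temps_en_s(data)
--     temp = data[0]
--     for elem in data:
--         if not elem[1] < temp[1]:
--             continue
--         temp = elem
--     return temp
-- ===== SOURCE B (Python) =====
-- def temps_secondes(time):
--     """ Returns how many seconds are in (hh, mm, ss). """
--     assert time[0] < 24 and time[1] < 60 and time[2] < 60, 'Format must be (hh, mm, ss) with hh < 24, mm < 60, ss < 60.'
--     return time[0] * 3600 + time[1] * 60 + time[2]
--
-- def gagnant(data):
--     converted = [(name, temps_secondes(t)) for name, t in data]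
--     return sorted(converted, key=lambda p: p[1])[0]
-- ===== Notes on version B (the rewrite author's own statement) =====
-- stated objective: alternative
-- what changed: Replaces the running-minimum scan (seed first element, overwrite on strictly smaller) with a stable ascending sort on the seconds key followed by taking the head, which preserves first-wins tie-breaking.
import Mathlib
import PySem

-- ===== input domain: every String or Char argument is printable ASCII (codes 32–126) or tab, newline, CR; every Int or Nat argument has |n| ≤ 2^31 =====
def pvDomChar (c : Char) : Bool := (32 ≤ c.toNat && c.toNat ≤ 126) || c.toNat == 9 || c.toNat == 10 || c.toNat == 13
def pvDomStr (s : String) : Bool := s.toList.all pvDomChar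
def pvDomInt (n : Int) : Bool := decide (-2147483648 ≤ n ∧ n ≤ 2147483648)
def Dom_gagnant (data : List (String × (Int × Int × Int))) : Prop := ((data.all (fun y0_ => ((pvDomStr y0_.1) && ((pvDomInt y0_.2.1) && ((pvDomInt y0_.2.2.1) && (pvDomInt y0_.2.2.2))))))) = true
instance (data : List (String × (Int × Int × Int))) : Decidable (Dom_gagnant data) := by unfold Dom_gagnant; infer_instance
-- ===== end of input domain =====

-- B replaces A's running-minimum scan with a stable sort on the seconds key plus head pick (alternative decomposition, same results).


-- ===== PORT A =====
-- temps_secondes; the assert (hh < 24, mm < 60, ss < 60) is where Python raises — excluded by Pre_gagnant.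
def pvTempsSecondes (t : Int × Int × Int) : Int := t.1 * 3600 + t.2.1 * 60 + t.2.2

-- temps_en_s: append loop
def pvTempsEnS (data : List (String × (Int × Int × Int))) : List (String × Int) :=
  data.foldl (fun acc elem => acc ++ [(elem.1, pvTempsSecondes elem.2)]) []

def gagnant (data : List (String × (Int × Int × Int))) : String × Int :=
  let d := pvTempsEnS data
  -- data[0]: IndexError on empty input — excluded by Pre_gagnant
  let temp := PySem.List.pyGetD d 0 ("", 0)
  d.foldl (fun temp elem => if ¬ (elem.2 < temp.2) then temp else elem) temp

-- ===== PORT B =====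
def gagnant_alt (data : List (String × (Int × Int × Int))) : String × Int :=
  let converted := data.map (fun e => (e.1, pvTempsSecondes e.2))
  -- sorted(converted, key=p[1])[0]: IndexError on empty input — excluded by Pre_gagnant
  PySem.List.pyGetD (PySem.List.sorted converted (fun p => p.2) false) 0 ("", 0)

-- ===== PRECONDITION & SPEC =====
-- Pre_ excludes exactly where Python A raises: empty input (IndexError on data[0]) and
-- entries failing temps_secondes's assert hh < 24 ∧ mm < 60 ∧ ss < 60 (AssertionError).
def Pre_gagnant (data : List (String × (Int × Int × Int))) : Prop :=
  data ≠ [] ∧ ∀ e ∈ data, e.2.1 < 24 ∧ e.2.2.1 < 60 ∧ e.2.2.2 < 60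
instance (data : List (String × (Int × Int × Int))) : Decidable (Pre_gagnant data) := by unfold Pre_gagnant; infer_instance
def pvWitness_gagnant : (List (String × (Int × Int × Int))) := [("a", (0, 0, 5)), ("b", (0, 0, 3))]
def Spec_gagnant (data : List (String × (Int × Int × Int))) (out : String × Int) : Prop := out = gagnant_alt data
instance (data : List (String × (Int × Int × Int))) (out : String × Int) : Decidable (Spec_gagnant data out) := by unfold Spec_gagnant; infer_instance

-- ===== CLAIM (what is proved, stated in full; the proofs are below) =====
def Claim_equal_gagnant : Prop := ∀ (data : List (String × (Int × Int × Int))), Dom_gagnant data → Pre_gagnant data → Spec_gagnant data (gagnant data)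

-- ===== LEMMAS AND PROOFS =====

-- head of an insertBy step: the new head is the incoming element iff its key is strictly smaller (stability = first wins)
theorem pv_head_insertBy {α : Type} (key : α → Int) (y m : α) (acc : List α)
    (h : acc.head? = some m) :
    (PySem.List.insertBy (fun a b => decide (key a < key b)) y acc).head?
      = some (if key y < key m then y else m) := by
  cases acc with
  | nil => simp at h
  | cons z zs =>
    simp only [List.head?_cons, Option.some.injEq] at h
    subst h
    by_cases hk : key y < key z <;> simp [PySem.List.insertBy, hk]

-- loop invariant: the head of the insertion-sort accumulator is the first-wins running minimum
theorem pv_foldl_insertBy_head {α : Type} (key : α → Int) :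
    ∀ (t : List α) (acc : List α) (m : α), acc.head? = some m →
      ((t.foldl (fun acc y => PySem.List.insertBy (fun a b => decide (key a < key b)) y acc) acc).head?
        = some (t.foldl (fun m y => if key y < key m then y else m) m)) := by
  intro t
  induction t with
  | nil => intro acc m h; simpa using h
  | cons y ys ih =>
    intro acc m h
    simp only [List.foldl_cons]
    exact ih _ _ (pv_head_insertBy key y m acc h)

-- ===== VERDICT (by name: the statement is the Claim_ definition above) =====
theorem gagnant_spec : Claim_equal_gagnant := by
  intro data _ hpre
  obtain ⟨hne, -⟩ := hpre
  unfold Spec_gagnant gagnant gagnant_alt pvTempsEnS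
  rw [PySem.List.foldl_append_singleton_eq_map]
  simp only [List.nil_append]
  cases data with
  | nil => exact absurd rfl hne
  | cons x t =>
    set f : (String × (Int × Int × Int)) → String × Int := fun e => (e.1, pvTempsSecondes e.2) with hf
    simp only [List.map_cons]
    -- A side: seed = head, and folding the head over itself is a no-op
    rw [PySem.List.pyGetD_zero_cons, List.foldl_cons]
    have hAhead : (if ¬ ((f x).2 < (f x).2) then f x else f x) = f x := by simp
    rw [hAhead]
    -- B side: head of the stable sort is the first-wins running minimum
    rw [PySem.List.sorted_eq_foldl_insertBy, List.foldl_cons]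
    have hstep : PySem.List.insertBy (fun a b => decide (a.2 < b.2)) (f x) ([] : List (String × Int)) = [f x] := by
      simp [PySem.List.insertBy]
    rw [hstep]
    have hhead := pv_foldl_insertBy_head (fun p : String × Int => p.2) (t.map f) [f x] (f x) (by simp)
    have hA : (List.foldl (fun temp elem => if ¬ (elem.2 < temp.2) then temp else elem) (f x) (t.map f))
        = (List.foldl (fun m y => if y.2 < m.2 then y else m) (f x) (t.map f)) := by
      apply PySem.List.foldl_congr_mem
      intro acc y _
      by_cases hc : y.2 < acc.2 <;> simp [hc]
    rw [hA]
    -- take the head of the nonempty sorted accumulator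
    cases hres : (List.foldl (fun acc y => PySem.List.insertBy (fun a b => decide (a.2 < b.2)) y acc) [f x] (t.map f)) with
    | nil => rw [hres] at hhead; simp at hhead
    | cons r rs =>
      rw [hres] at hhead
      simp at hhead
      rw [PySem.List.pyGetD_zero_cons]
      exact hhead.symm
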